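-- pv_equiv track=rewrite | github.com/shashankcm95/AADI | services/orders/scripts/setup_cloudwatch_observability.py | select_latest_function_name
-- ===== SOURCE A (Python) =====
-- from typing import Any, Dict, Iterable, List, Optional, Sequence
--
-- def select_latest_function_name(
--     functions: Iterable[Dict[str, str]],
--     required_tokens: Sequence[str],
--     stack_prefix: Optional[str] = None,
-- ) -> Optional[str]:
--     candidates = []
--     for fn in functions:
--         name = str(fn.get("name") or "")
--         if not name:
--             continue
--         if stack_prefix and stack_prefix not in name:
--             continue
--         if not all(token in name for token in required_tokens):
--             continue
--         candidates.append(fn)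
--
--     if not candidates and stack_prefix:
--         # Fallback: if stack prefix mismatch, still try token-only match.
--         for fn in functions:
--             name = str(fn.get("name") or "")
--             if name and all(token in name for token in required_tokens):
--                 candidates.append(fn)
--
--     if not candidates:
--         return None
--
--     candidates.sort(key=lambda item: str(item.get("last_modified") or ""))
--     return str(candidates[-1]["name"])
-- ===== SOURCE B (Python) =====
-- from typing import Any, Dict, Iterable, List, Optional, Sequence
--
-- def select_latest_function_name(
--     functions: Iterable[Dict[str, str]],
--     required_tokens: Sequence[str],
--     stack_prefix: Optional[str] = None,
-- ) -> Optional[str]: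
--     # Single streaming pass tracking the best candidate (key >= keeps the last
--     # of equal-maximal keys, matching stable sort + [-1]); no list, no sort.
--     def tokens_ok(name):
--         return bool(name) and all(token in name for token in required_tokens)
--
--     def best(pred):
--         best_pair = None
--         for fn in functions:
--             name = str(fn.get("name") or "")
--             if not pred(name):
--                 continue
--             key = str(fn.get("last_modified") or "")
--             if best_pair is None or key >= best_pair[1]:
--                 best_pair = (name, key)
--         return None if best_pair is None else best_pair[0]
--
--     if stack_prefix:
--         result = best(lambda name: tokens_ok(name) and stack_prefix in name)
--         if result is not None:
--             return result
--         return best(tokens_ok)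
--     return best(tokens_ok)
-- ===== Notes on version B (the rewrite author's own statement) =====
-- stated objective: simpler
-- what changed: B replaces A's collect-all-candidates-then-stable-sort-and-take-last with a single streaming pass per filter that tracks the best (name, last_modified) pair, updating on key >= best so the last of equal-maximal keys wins exactly as stable sort + [-1] does.
import Mathlib
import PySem

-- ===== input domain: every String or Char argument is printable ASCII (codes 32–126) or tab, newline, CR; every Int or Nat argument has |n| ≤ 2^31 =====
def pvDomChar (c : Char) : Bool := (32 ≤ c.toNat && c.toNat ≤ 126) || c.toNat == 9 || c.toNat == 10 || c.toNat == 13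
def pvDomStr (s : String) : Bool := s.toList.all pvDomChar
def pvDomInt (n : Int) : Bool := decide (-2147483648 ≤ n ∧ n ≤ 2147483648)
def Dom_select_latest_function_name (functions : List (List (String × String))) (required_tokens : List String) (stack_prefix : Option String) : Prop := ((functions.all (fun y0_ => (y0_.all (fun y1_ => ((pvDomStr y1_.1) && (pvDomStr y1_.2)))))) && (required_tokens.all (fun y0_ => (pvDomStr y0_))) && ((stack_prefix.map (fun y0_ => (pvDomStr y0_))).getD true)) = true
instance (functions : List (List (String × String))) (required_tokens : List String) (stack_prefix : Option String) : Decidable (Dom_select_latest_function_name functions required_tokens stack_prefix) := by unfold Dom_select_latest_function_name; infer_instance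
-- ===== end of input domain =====

-- B replaces A's collect-all-then-stable-sort with a single streaming pass that keeps the
-- best (name, key) pair, using key >= best so the last of equal-maximal keys wins (simpler).

-- shared accessors: str(fn.get("name") or "") and str(fn.get("last_modified") or "")
-- (the values are strings, so `x or ""` is "" exactly when x is None or "", which getD "" matches)
def pvName (fn : List (String × String)) : String :=
  ((PySem.Dict.mk fn).get? "name").getD ""
def pvKey (fn : List (String × String)) : String :=
  ((PySem.Dict.mk fn).get? "last_modified").getD ""

-- ===== PORT A =====
-- first loop: prefix + token filtering, appending matching fns
def selA_pass1 (functions : List (List (String × String))) (required_tokens : List String)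
    (stack_prefix : Option String) : List (List (String × String)) :=
  functions.foldl (fun acc fn =>
    let name := pvName fn
    if name = "" then acc
    else if (match stack_prefix with
             | some sp => decide (sp ≠ "") && !(PySem.Str.isIn sp name)
             | none => false) then acc
    else if !(required_tokens.all (fun t => PySem.Str.isIn t name)) then acc
    else acc ++ [fn]) []

-- fallback loop: token-only filtering
def selA_pass2 (functions : List (List (String × String))) (required_tokens : List String) :
    List (List (String × String)) :=
  functions.foldl (fun acc fn =>
    let name := pvName fn
    if decide (name ≠ "") && required_tokens.all (fun t => PySem.Str.isIn t name)
    then acc ++ [fn] else acc) []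

def select_latest_function_name (functions : List (List (String × String))) (required_tokens : List String) (stack_prefix : Option String) : Option String :=
  let c1 := selA_pass1 functions required_tokens stack_prefix
  let candidates :=
    -- `not candidates and stack_prefix`: stack_prefix is truthy iff it is Some of a
    -- nonempty string, i.e. iff stack_prefix.getD "" ≠ ""
    if c1 = [] ∧ stack_prefix.getD "" ≠ ""
    then selA_pass2 functions required_tokens else c1
  if candidates = [] then none
  else
    -- candidates.sort(key=λ item: str(item.get("last_modified") or "")); str(candidates[-1]["name"])
    -- every candidate has a nonempty "name" value, so ["name"] never raises and equals pvName
    ((PySem.List.sorted candidates pvKey false).getLast?).map pvName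

-- ===== PORT B =====
-- tokens_ok(name)
def selB_tokOK (required_tokens : List String) (name : String) : Bool :=
  decide (name ≠ "") && required_tokens.all (fun t => PySem.Str.isIn t name)

-- one iteration of best(pred)'s loop: state best_pair : Option (name, key)
def selB_step (pred : String → Bool) (st : Option (String × String))
    (fn : List (String × String)) : Option (String × String) :=
  let name := pvName fn
  if !(pred name) then st
  else
    let k := pvKey fn
    match st with
    | none => some (name, k)
    | some (_, bk) => if decide (bk ≤ k) then some (name, k) else st

-- best(pred): streaming pass returning the winning name
def selB_best (functions : List (List (String × String))) (pred : String → Bool) : Option String :=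
  (functions.foldl (selB_step pred) none).map (·.1)

def select_latest_function_name_alt (functions : List (List (String × String))) (required_tokens : List String) (stack_prefix : Option String) : Option String :=
  match stack_prefix with
  | some sp =>
    if sp ≠ "" then
      match selB_best functions (fun n => selB_tokOK required_tokens n && PySem.Str.isIn sp n) with
      | some r => some r
      | none => selB_best functions (selB_tokOK required_tokens)
    else selB_best functions (selB_tokOK required_tokens)
  | none => selB_best functions (selB_tokOK required_tokens)

-- ===== PRECONDITION & SPEC =====
def Spec_select_latest_function_name (functions : List (List (String × String))) (required_tokens : List String) (stack_prefix : Option String) (out : Option String) : Prop := out = select_latest_function_name_alt functions required_tokens stack_prefix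
instance (functions : List (List (String × String))) (required_tokens : List String) (stack_prefix : Option String) (out : Option String) : Decidable (Spec_select_latest_function_name functions required_tokens stack_prefix out) := by unfold Spec_select_latest_function_name; infer_instance

-- ===== CLAIM (what is proved, stated in full; the proofs are below) =====
def Claim_equal_select_latest_function_name : Prop := ∀ (functions : List (List (String × String))) (required_tokens : List String) (stack_prefix : Option String), Dom_select_latest_function_name functions required_tokens stack_prefix → Spec_select_latest_function_name functions required_tokens stack_prefix (select_latest_function_name functions required_tokens stack_prefix)

-- ===== LEMMAS AND PROOFS =====

-- the common reference computation: last element of l with maximal pvKey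
def lmStep (st : Option (List (String × String))) (fn : List (String × String)) :
    Option (List (String × String)) :=
  match st with
  | none => some fn
  | some b => if pvKey b ≤ pvKey fn then some fn else st

def lastMax (l : List (List (String × String))) : Option (List (String × String)) :=
  l.foldl lmStep none

theorem lastMax_append_singleton (l : List (List (String × String))) (x : List (String × String)) :
    lastMax (l ++ [x]) = lmStep (lastMax l) x := by
  simp [lastMax, List.foldl_append]

theorem insertBy_getLast (x : List (String × String)) (ys : List (List (String × String)))
    (h : ys.Pairwise (fun a b => pvKey a ≤ pvKey b)) :
    (PySem.List.insertBy (fun a b => decide (pvKey a < pvKey b)) x ys).getLast? =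
      match ys.getLast? with
      | none => some x
      | some m => if pvKey m ≤ pvKey x then some x else some m := by
  induction ys with
  | nil => rfl
  | cons y t ih =>
    have hpw := h.tail
    have hy : ∀ b ∈ t, pvKey y ≤ pvKey b := fun b hb => (List.pairwise_cons.mp h).1 b hb
    simp only [PySem.List.insertBy]
    by_cases hlt : pvKey x < pvKey y
    · simp only [hlt, decide_true, if_true]
      cases t with
      | nil => simp [not_le.mpr hlt]
      | cons a s =>
        cases ht : (a :: s).getLast? with
        | none => simp at ht
        | some m =>
          have hmem : m ∈ a :: s := List.mem_of_getLast? ht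
          have hxm : pvKey x < pvKey m := lt_of_lt_of_le hlt (hy m hmem)
          rw [List.getLast?_cons_cons, List.getLast?_cons_cons, ht]
          simp [not_le.mpr hxm]
    · simp only [hlt, decide_false, Bool.false_eq_true, if_false]
      cases hi : PySem.List.insertBy (fun a b => decide (pvKey a < pvKey b)) x t with
      | nil =>
        exfalso
        cases t with
        | nil => simp [PySem.List.insertBy] at hi
        | cons a s =>
          simp only [PySem.List.insertBy] at hi
          revert hi; split <;> simp
      | cons a s =>
        rw [List.getLast?_cons_cons, ← hi, ih hpw]
        cases ht : t.getLast? with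
        | none =>
          have : t = [] := List.getLast?_eq_none_iff.mp ht
          subst this
          simp [le_of_not_gt hlt]
        | some m =>
          have ht' : (y :: t).getLast? = some m := by
            cases t with
            | nil => simp at ht
            | cons b u => rw [List.getLast?_cons_cons, ht]
          rw [ht']

-- last of the stable sort by pvKey = the running last-max
theorem sorted_getLast_eq_lastMax (c : List (List (String × String))) :
    (PySem.List.sorted c pvKey false).getLast? = lastMax c := by
  induction c using List.reverseRecOn with
  | nil => rfl
  | append_singleton l x ih =>
    have hpw : (PySem.List.sorted l pvKey false).Pairwise (fun a b => pvKey a ≤ pvKey b) :=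
      PySem.List.sorted_pairwise l pvKey
    rw [PySem.List.sorted_eq_foldl_insertBy, List.foldl_append, List.foldl_cons, List.foldl_nil,
        ← PySem.List.sorted_eq_foldl_insertBy, insertBy_getLast x _ hpw, ih,
        lastMax_append_singleton]
    cases lastMax l with
    | none => rfl
    | some b => rfl

-- B's guarded fold over fns = (name, key) image of the guarded lastMax fold
theorem selB_fold_eq (pred : String → Bool) (l : List (List (String × String)))
    (st : Option (List (String × String))) :
    l.foldl (selB_step pred) (st.map (fun b => (pvName b, pvKey b))) =
      (l.foldl (fun s fn => if pred (pvName fn) then lmStep s fn else s) st).map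
        (fun b => (pvName b, pvKey b)) := by
  induction l generalizing st with
  | nil => rfl
  | cons fn t ih =>
    rw [List.foldl_cons, List.foldl_cons]
    have hstep : selB_step pred (st.map (fun b => (pvName b, pvKey b))) fn =
        ((if pred (pvName fn) then lmStep st fn else st).map (fun b => (pvName b, pvKey b))) := by
      by_cases hp : pred (pvName fn) = true
      · cases st with
        | none => simp [selB_step, lmStep, hp]
        | some b =>
          simp only [selB_step, lmStep, hp, if_true, Option.map_some, Bool.not_true,
            Bool.false_eq_true, if_false]
          by_cases hk : pvKey b ≤ pvKey fn
          · simp [hk]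
          · simp [hk]
      · cases st <;> simp [selB_step, hp]
    rw [hstep]
    by_cases hp : pred (pvName fn) = true
    · simp only [hp, if_true]; exact ih (lmStep st fn)
    · simp only [hp, Bool.false_eq_true, if_false]; exact ih st

-- best(pred) = name of the last maximal-key element of the filtered list
theorem selB_best_eq (fns : List (List (String × String))) (pred : String → Bool) :
    selB_best fns pred = (lastMax (fns.filter (fun fn => pred (pvName fn)))).map pvName := by
  have h0 : (none : Option (String × String)) =
      (none : Option (List (String × String))).map (fun b => (pvName b, pvKey b)) := rfl
  rw [selB_best, h0, selB_fold_eq, lastMax, List.foldl_filter]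
  cases fns.foldl (fun s fn => if pred (pvName fn) then lmStep s fn else s) none <;> rfl

theorem lastMax_eq_none_iff (l : List (List (String × String))) :
    lastMax l = none ↔ l = [] := by
  constructor
  · intro h
    cases l with
    | nil => rfl
    | cons fn t =>
      exfalso
      have hsome : ∀ (t : List (List (String × String))) (b : List (String × String)),
          (t.foldl lmStep (some b)).isSome = true := by
        intro t
        induction t with
        | nil => intro b; rfl
        | cons a s ih =>
          intro b
          rw [List.foldl_cons]
          have hb : lmStep (some b) a = some (if pvKey b ≤ pvKey a then a else b) := by
            simp only [lmStep]; split <;> simp_all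
          rw [hb]; exact ih _
      have hs := hsome t fn
      rw [show (t.foldl lmStep (some fn)) = lastMax (fn :: t) from rfl, h] at hs
      simp at hs
  · intro h; subst h; rfl

-- a foldl whose step appends iff a predicate holds is a filter
theorem foldl_if_filter {α : Type} (p : α → Bool) (step : List α → α → List α)
    (hstep : ∀ acc fn, step acc fn = if p fn then acc ++ [fn] else acc)
    (l : List α) : ∀ (acc : List α), l.foldl step acc = acc ++ l.filter p := by
  induction l with
  | nil => intro acc; simp
  | cons fn t ih =>
    intro acc
    rw [List.foldl_cons, hstep, List.filter_cons]
    by_cases hp : p fn = true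
    · rw [if_pos hp, if_pos hp, ih]; simp
    · rw [if_neg hp, if_neg hp, ih]

-- A's first loop is a filter
theorem selA_pass1_eq_filter (fns : List (List (String × String))) (rt : List String)
    (sp : Option String) :
    selA_pass1 fns rt sp = fns.filter (fun fn =>
      decide (pvName fn ≠ "") &&
      !(match sp with | some s => decide (s ≠ "") && !(PySem.Str.isIn s (pvName fn)) | none => false) &&
      rt.all (fun t => PySem.Str.isIn t (pvName fn))) := by
  rw [selA_pass1, foldl_if_filter _ _ ?_ fns [], List.nil_append]
  intro acc fn
  show (if pvName fn = "" then acc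
        else if (match sp with
                 | some s => decide (s ≠ "") && !(PySem.Str.isIn s (pvName fn))
                 | none => false) then acc
        else if !(rt.all (fun t => PySem.Str.isIn t (pvName fn))) then acc
        else acc ++ [fn]) = _
  by_cases h1 : pvName fn = ""
  · have hd : decide (pvName fn ≠ "") = false := by simp [h1]
    rw [if_pos h1, hd, Bool.false_and, Bool.false_and]
    rfl
  · have hd : decide (pvName fn ≠ "") = true := by simp [h1]
    rw [if_neg h1, hd, Bool.true_and]
    by_cases h2 : (match sp with
        | some s => decide (s ≠ "") && !(PySem.Str.isIn s (pvName fn))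
        | none => false) = true
    · rw [if_pos h2, h2, Bool.not_true, Bool.false_and]
      rfl
    · rw [if_neg h2, Bool.eq_false_iff.mpr h2, Bool.not_false, Bool.true_and]
      by_cases h3 : rt.all (fun t => PySem.Str.isIn t (pvName fn)) = true
      · rw [h3, Bool.not_true, if_neg (by simp), if_pos rfl]
      · rw [Bool.eq_false_iff.mpr h3, Bool.not_false, if_pos rfl, if_neg (by simp)]

-- A's fallback loop is a filter
theorem selA_pass2_eq_filter (fns : List (List (String × String))) (rt : List String) :
    selA_pass2 fns rt = fns.filter (fun fn => selB_tokOK rt (pvName fn)) := by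
  rw [selA_pass2, foldl_if_filter _ _ ?_ fns [], List.nil_append]
  intro acc fn
  rfl

-- the single-pass comparison: A's filter-sort-last = B's streaming best
theorem onePass (fns : List (List (String × String))) (p : List (String × String) → Bool)
    (pred : String → Bool) (hp : ∀ fn, p fn = pred (pvName fn)) :
    (if fns.filter p = [] then none
     else ((PySem.List.sorted (fns.filter p) pvKey false).getLast?).map pvName) =
      selB_best fns pred := by
  rw [selB_best_eq]
  have hf : fns.filter p = fns.filter (fun fn => pred (pvName fn)) :=
    List.filter_congr (fun fn _ => hp fn)
  rw [← hf]
  by_cases h : fns.filter p = []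
  · rw [if_pos h, h]; rfl
  · rw [if_neg h, sorted_getLast_eq_lastMax]

-- ===== VERDICT (by name: the statement is the Claim_ definition above) =====
theorem select_latest_function_name_spec : Claim_equal_select_latest_function_name := by
  intro fns rt sp _hdom
  show select_latest_function_name fns rt sp = select_latest_function_name_alt fns rt sp
  cases sp with
  | none =>
    simp only [select_latest_function_name]
    rw [if_neg (show ¬(selA_pass1 fns rt none = [] ∧ (none : Option String).getD "" ≠ "") from
          by simp),
        select_latest_function_name_alt, selA_pass1_eq_filter]
    exact onePass fns _ _ (fun fn => by simp [selB_tokOK])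
  | some s =>
    by_cases hs : s = ""
    · subst hs
      simp only [select_latest_function_name]
      rw [if_neg (show ¬(selA_pass1 fns rt (some "") = [] ∧ (some "").getD "" ≠ "") from
            by simp),
          select_latest_function_name_alt,
          if_neg (show ¬(("" : String) ≠ "") from by simp), selA_pass1_eq_filter]
      exact onePass fns _ _ (fun fn => by simp [selB_tokOK])
    · have hpred : ∀ fn, (decide (pvName fn ≠ "") &&
          !(match some s with | some s => decide (s ≠ "") && !(PySem.Str.isIn s (pvName fn)) | none => false) &&
          rt.all (fun t => PySem.Str.isIn t (pvName fn))) =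
          ((fun n => selB_tokOK rt n && PySem.Str.isIn s n) (pvName fn)) := by
        intro fn
        simp only [selB_tokOK, hs, ne_eq, not_false_iff, decide_true, Bool.true_and]
        by_cases h1 : pvName fn = "" <;>
          by_cases h2 : PySem.Str.isIn s (pvName fn) = true <;>
            by_cases h3 : rt.all (fun t => PySem.Str.isIn t (pvName fn)) = true <;>
              simp [*, Bool.and_comm]
      have hb1 := onePass fns (fun fn =>
          decide (pvName fn ≠ "") &&
          !(match some s with | some s => decide (s ≠ "") && !(PySem.Str.isIn s (pvName fn)) | none => false) &&
          rt.all (fun t => PySem.Str.isIn t (pvName fn)))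
        (fun n => selB_tokOK rt n && PySem.Str.isIn s n) hpred
      simp only [select_latest_function_name, selA_pass1_eq_filter]
      rw [select_latest_function_name_alt, if_pos hs]
      by_cases hc : fns.filter (fun fn =>
          decide (pvName fn ≠ "") &&
          !(match some s with | some s => decide (s ≠ "") && !(PySem.Str.isIn s (pvName fn)) | none => false) &&
          rt.all (fun t => PySem.Str.isIn t (pvName fn))) = []
      · have hbnone : selB_best fns (fun n => selB_tokOK rt n && PySem.Str.isIn s n) = none := by
          rw [← hb1, if_pos hc]
        rw [if_pos (show (fns.filter (fun fn =>
          decide (pvName fn ≠ "") &&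
          !(match some s with | some s => decide (s ≠ "") && !(PySem.Str.isIn s (pvName fn)) | none => false) &&
          rt.all (fun t => PySem.Str.isIn t (pvName fn))) = [] ∧ (some s).getD "" ≠ "") from ⟨hc, by simpa using hs⟩),
            selA_pass2_eq_filter, hbnone]
        exact onePass fns _ _ (fun fn => rfl)
      · rw [if_neg (show ¬(fns.filter (fun fn =>
          decide (pvName fn ≠ "") &&
          !(match some s with | some s => decide (s ≠ "") && !(PySem.Str.isIn s (pvName fn)) | none => false) &&
          rt.all (fun t => PySem.Str.isIn t (pvName fn))) = [] ∧ (some s).getD "" ≠ "") from fun h => hc h.1),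
            if_neg hc, ← hb1, if_neg hc]
        cases h : (PySem.List.sorted (fns.filter (fun fn =>
            decide (pvName fn ≠ "") &&
            !(match some s with | some s => decide (s ≠ "") && !(PySem.Str.isIn s (pvName fn)) | none => false) &&
            rt.all (fun t => PySem.Str.isIn t (pvName fn)))) pvKey false).getLast? with
        | none =>
          exfalso
          rw [sorted_getLast_eq_lastMax, lastMax_eq_none_iff] at h
          exact hc h
        | some m => rfl
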